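-- pv_equiv track=rewrite | github.com/KravitzLabDevices/FED1 | FED-Python-scripts/meals.py | extract_times
-- ===== SOURCE A (Python) =====
-- def extract_times(list_all, start_date, end_date):
--     extracted_data = list()
--     for el in list_all:
--         start_index = 0
--         end_index = 0
--         for timestamp in el:
--             # as soon as it finds start date, it stops iterating further
--             if timestamp >= start_date and timestamp <= end_date:
--                 # get the index for the start date in that list
--                 start_index = el.index(timestamp)
--                 break
--         for timestamp in reversed(el):
--             # as soon as it finds end date, it stops iterating
--             if timestamp <= end_date and timestamp >= start_date:
--                 # get the index for the end date in that list
--                 end_index = el.index(timestamp) + 1     # add 1 for the list slicing to include that index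
--                 break
--         # append only lists from start to end date
--         extracted_data.append(el[start_index:end_index])
--     return extracted_data
-- ===== SOURCE B (Python) =====
-- def extract_times(list_all, start_date, end_date):
--     # One filtering pass per list: slice from the first in-range timestamp
--     # to the last in-range timestamp, locating both by value.
--     result = []
--     for el in list_all:
--         in_range = [t for t in el if start_date <= t <= end_date]
--         if in_range:
--             result.append(el[el.index(in_range[0]):el.index(in_range[-1]) + 1])
--         else:
--             result.append([])
--     return result
-- ===== Notes on version B (the rewrite author's own statement) =====
-- stated objective: simpler
-- what changed: Replaces A's two directional early-exit scans per list (forward, then over reversed(el)) with one filtering comprehension of the in-range timestamps and a slice between the positions of its first and last value.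
import Mathlib
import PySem

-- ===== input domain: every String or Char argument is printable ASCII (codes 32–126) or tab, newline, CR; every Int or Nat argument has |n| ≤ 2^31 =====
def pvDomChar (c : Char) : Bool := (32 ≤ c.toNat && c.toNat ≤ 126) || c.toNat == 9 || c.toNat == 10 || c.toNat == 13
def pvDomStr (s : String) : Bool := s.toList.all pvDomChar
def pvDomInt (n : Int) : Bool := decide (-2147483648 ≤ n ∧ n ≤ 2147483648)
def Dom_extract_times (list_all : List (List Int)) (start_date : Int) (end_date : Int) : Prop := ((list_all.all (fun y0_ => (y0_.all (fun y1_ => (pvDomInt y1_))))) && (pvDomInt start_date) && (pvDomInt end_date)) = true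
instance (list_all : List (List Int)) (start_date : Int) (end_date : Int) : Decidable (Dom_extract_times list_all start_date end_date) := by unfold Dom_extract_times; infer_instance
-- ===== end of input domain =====

-- B replaces A's two directional early-exit scans (forward and over reversed(el), each
-- followed by list.index) with one filtering pass and a slice between the positions of
-- its first and last value; objective: simpler.

-- ===== PORT A =====
-- el.index(t) (always found here, since t was taken from el; ValueError unreachable)
def pyIndexD (el : List Int) (t : Int) : Int := ((PySem.List.index? el t).getD 0 : Nat)

-- 'for timestamp in el: if timestamp >= start_date and timestamp <= end_date: start_index = el.index(timestamp); break'
def aFirstLoop (orig : List Int) (sd ed : Int) : List Int → Int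
  | [] => 0                                      -- start_index stays 0
  | t :: rest => if sd ≤ t ∧ t ≤ ed then pyIndexD orig t else aFirstLoop orig sd ed rest

-- 'for timestamp in reversed(el): if timestamp <= end_date and timestamp >= start_date: end_index = el.index(timestamp) + 1; break'
def aLastLoop (orig : List Int) (sd ed : Int) : List Int → Int
  | [] => 0                                      -- end_index stays 0
  | t :: rest => if t ≤ ed ∧ sd ≤ t then pyIndexD orig t + 1 else aLastLoop orig sd ed rest

def extract_times (list_all : List (List Int)) (start_date : Int) (end_date : Int) : List (List Int) :=
  list_all.map (fun el =>
    PySem.List.slice el (some (aFirstLoop el start_date end_date el))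
                        (some (aLastLoop el start_date end_date el.reverse)))

-- ===== PORT B =====
-- in_range = [t for t in el if start_date <= t <= end_date];
-- el[el.index(in_range[0]) : el.index(in_range[-1]) + 1], [] when in_range is empty.
def altCut (sd ed : Int) (el : List Int) : List Int :=
  match el.filter (fun t => decide (sd ≤ t ∧ t ≤ ed)) with
  | [] => []
  | v :: vs =>
      PySem.List.slice el (some (pyIndexD el v))
        (some (pyIndexD el ((v :: vs).getLast (List.cons_ne_nil v vs)) + 1))

def extract_times_alt (list_all : List (List Int)) (start_date : Int) (end_date : Int) : List (List Int) :=
  list_all.map (altCut start_date end_date)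

-- ===== PRECONDITION & SPEC =====
def Spec_extract_times (list_all : List (List Int)) (start_date : Int) (end_date : Int) (out : List (List Int)) : Prop := out = extract_times_alt list_all start_date end_date
instance (list_all : List (List Int)) (start_date : Int) (end_date : Int) (out : List (List Int)) : Decidable (Spec_extract_times list_all start_date end_date out) := by unfold Spec_extract_times; infer_instance

-- ===== CLAIM (what is proved, stated in full; the proofs are below) =====
def Claim_equal_extract_times : Prop := ∀ (list_all : List (List Int)) (start_date : Int) (end_date : Int), Dom_extract_times list_all start_date end_date → Spec_extract_times list_all start_date end_date (extract_times list_all start_date end_date)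

-- ===== LEMMAS AND PROOFS =====

-- A's first loop returns el.index(first in-range element) (0 when none).
theorem aFirstLoop_eq_find (orig : List Int) (sd ed : Int) (l : List Int) :
    aFirstLoop orig sd ed l =
      match l.find? (fun t => decide (sd ≤ t ∧ t ≤ ed)) with
      | some t => pyIndexD orig t
      | none => 0 := by
  induction l with
  | nil => rfl
  | cons t rest ih =>
      simp only [aFirstLoop, List.find?_cons]
      by_cases h : sd ≤ t ∧ t ≤ ed
      · simp [h]
      · simp [h, ih]

-- A's second loop returns el.index(first in-range element of the scanned list) + 1 (0 when none).
theorem aLastLoop_eq_find (orig : List Int) (sd ed : Int) (l : List Int) :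
    aLastLoop orig sd ed l =
      match l.find? (fun t => decide (sd ≤ t ∧ t ≤ ed)) with
      | some t => pyIndexD orig t + 1
      | none => 0 := by
  induction l with
  | nil => rfl
  | cons t rest ih =>
      simp only [aLastLoop, List.find?_cons]
      by_cases h : sd ≤ t ∧ t ≤ ed
      · have h' : t ≤ ed ∧ sd ≤ t := ⟨h.2, h.1⟩
        simp [h']
      · have h' : ¬ (t ≤ ed ∧ sd ≤ t) := fun hc => h ⟨hc.2, hc.1⟩
        simp [h, h', ih]

-- per-element equivalence: A's forward scan finds the head of B's filter,
-- A's reversed scan finds its last element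
theorem cut_eq (sd ed : Int) (el : List Int) :
    PySem.List.slice el (some (aFirstLoop el sd ed el)) (some (aLastLoop el sd ed el.reverse)) =
      altCut sd ed el := by
  set q : Int → Bool := fun t => decide (sd ≤ t ∧ t ≤ ed) with hq
  unfold altCut
  cases hfe : el.filter q with
  | nil =>
      have hfind : el.find? q = none := by
        rw [← List.head?_filter, hfe]; rfl
      have hfindr : el.reverse.find? q = none := by
        rw [← List.head?_filter, List.filter_reverse, hfe]; rfl
      rw [aFirstLoop_eq_find, aLastLoop_eq_find, hfind, hfindr]
      show PySem.List.slice el (some 0) (some 0) = []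
      simp only [PySem.List.slice_zero_start]
      rw [PySem.List.slice_to el (by omega)]
      simp
  | cons v vs =>
      have hfind : el.find? q = some v := by
        rw [← List.head?_filter, hfe]; rfl
      have hlast : el.reverse.find? q = some ((v :: vs).getLast (List.cons_ne_nil v vs)) := by
        rw [← List.head?_filter, List.filter_reverse, hfe, List.head?_reverse]
        simp [List.getLast?_eq_some_getLast]
      rw [aFirstLoop_eq_find, aLastLoop_eq_find, hfind, hlast]

-- ===== VERDICT (by name: the statement is the Claim_ definition above) =====
theorem extract_times_spec : Claim_equal_extract_times := by
  intro list_all sd ed _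
  unfold Spec_extract_times extract_times extract_times_alt
  exact List.map_congr_left (fun el _ => cut_eq sd ed el)
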